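-- pv_equiv track=rewrite | github.com/Diyabavariya/Personal-AI-Knowledge-Assistant | ingestion/chunker.py | build_semantic_blocks
-- ===== SOURCE A (Python) =====
-- def build_semantic_blocks(text):
--     """
--     Build complete semantic blocks from PDF/DOC text.
--     A block = one complete thought ending with a period.
--     """
--     lines = [l.strip() for l in text.split("\n") if l.strip()]
--     blocks = []
--     buffer = ""
--
--     for line in lines:
--         # skip headings / junk
--         if len(line.split()) < 4:
--             continue
--         if line.isupper():
--             continue
--
--         buffer = buffer + " " + line if buffer else line
--
--         if buffer.endswith("."):
--             blocks.append(buffer.strip())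
--             buffer = ""
--
--     if buffer:
--         blocks.append(buffer.strip())
--
--     return blocks
-- ===== SOURCE B (Python) =====
-- def build_semantic_blocks(text):
--     """
--     Build complete semantic blocks from PDF/DOC text.
--     Different decomposition: first select the valid lines with one
--     comprehension, then recursively cut the list at each line that
--     ends with a period, joining every slice with single spaces.
--     """
--     valid = [s for s in (l.strip() for l in text.split("\n"))
--              if s and len(s.split()) >= 4 and not s.isupper()]
--
--     def blocks_of(rest):
--         if not rest:
--             return []
--         i = next((i for i, l in enumerate(rest) if l.endswith(".")), None)
--         if i is None:
--             return [" ".join(rest)]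
--         return [" ".join(rest[:i + 1])] + blocks_of(rest[i + 1:])
--
--     return blocks_of(valid)
-- ===== Notes on version B (the rewrite author's own statement) =====
-- stated objective: alternative
-- what changed: Replaces A's single stateful loop carrying a growing string buffer by a two-phase decomposition: one comprehension selects the valid lines, then a recursion cuts the line list at each period-ending line and joins each slice.
import Mathlib
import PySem

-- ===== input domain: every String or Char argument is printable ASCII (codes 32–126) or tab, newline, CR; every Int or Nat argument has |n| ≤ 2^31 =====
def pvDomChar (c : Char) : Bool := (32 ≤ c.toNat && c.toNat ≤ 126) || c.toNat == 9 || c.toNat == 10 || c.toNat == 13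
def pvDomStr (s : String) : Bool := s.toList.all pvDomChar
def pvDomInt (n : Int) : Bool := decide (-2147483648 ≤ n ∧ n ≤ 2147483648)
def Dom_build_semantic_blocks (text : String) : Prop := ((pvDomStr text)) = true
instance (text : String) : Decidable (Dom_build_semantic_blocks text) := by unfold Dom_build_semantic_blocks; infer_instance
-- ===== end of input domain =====

-- B replaces A's single stateful loop (a growing string buffer) by a two-phase
-- decomposition: select the valid lines once, then recursively cut the line list at
-- each period-ending line and join each slice; same cost, different structure.

-- Port of Python's str.isupper, exact on the ASCII domain (there the cased
-- characters are exactly a-z/A-Z): some uppercase letter and no lowercase letter.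
def pyStrIsupper (cs : List Char) : Bool :=
  cs.any PySem.Chars.isupper && cs.all (fun c => !PySem.Chars.islower c)

-- ===== PORT A =====
-- loop body: (blocks, buffer) updated by one line, branches in A's order
def bsbStep (st : List (List Char) × List Char) (line : List Char) :
    List (List Char) × List Char :=
  if (PySem.Chars.split₀ line).length < 4 then st
  else if pyStrIsupper line then st
  else
    let buffer := if st.2 ≠ [] then st.2 ++ ' ' :: line else line
    if PySem.Chars.endswith buffer ['.'] then (st.1 ++ [PySem.Chars.strip buffer], [])
    else (st.1, buffer)

def build_semantic_blocks (text : String) : List String :=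
  let lines := (PySem.Chars.splitOn text.toList ['\n']).filterMap
      (fun l => let s := PySem.Chars.strip l; if s = [] then none else some s)
  let st := lines.foldl bsbStep ([], [])
  let blocks := if st.2 ≠ [] then st.1 ++ [PySem.Chars.strip st.2] else st.1
  blocks.map String.ofList

-- ===== PORT B =====
-- the comprehension selecting the valid lines
def bsbValid (text : String) : List (List Char) :=
  (PySem.Chars.splitOn text.toList ['\n']).filterMap (fun l =>
    let s := PySem.Chars.strip l
    if s ≠ [] && decide (4 ≤ (PySem.Chars.split₀ s).length) && !pyStrIsupper s
    then some s else none)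

-- blocks_of: cut at the first period-ending line, join the slice, recurse on the rest
def bsbBlocksOf (rest : List (List Char)) : List (List Char) :=
  if h : rest = [] then []
  else
    match rest.findIdx? (fun l => PySem.Chars.endswith l ['.']) with
    | some i =>
        PySem.Chars.join [' '] (rest.take (i + 1)) :: bsbBlocksOf (rest.drop (i + 1))
    | none => [PySem.Chars.join [' '] rest]
termination_by rest.length
decreasing_by
  simp only [List.length_drop]
  have : rest.length ≠ 0 := fun hn => h (List.eq_nil_of_length_eq_zero hn)
  omega

def build_semantic_blocks_alt (text : String) : List String :=
  (bsbBlocksOf (bsbValid text)).map String.ofList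

-- ===== PRECONDITION & SPEC =====
def Spec_build_semantic_blocks (text : String) (out : List String) : Prop := out = build_semantic_blocks_alt text
instance (text : String) (out : List String) : Decidable (Spec_build_semantic_blocks text out) := by unfold Spec_build_semantic_blocks; infer_instance

-- ===== CLAIM (what is proved, stated in full; the proofs are below) =====
def Claim_equal_build_semantic_blocks : Prop := ∀ (text : String), Dom_build_semantic_blocks text → Spec_build_semantic_blocks text (build_semantic_blocks text)

-- ===== LEMMAS AND PROOFS =====

-- a line with no surrounding whitespace
def bsbStripped (l : List Char) : Prop :=
  (∀ c, l.head? = some c → PySem.Chars.isspace c = false) ∧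
  (∀ c, l.getLast? = some c → PySem.Chars.isspace c = false)

-- the two filters A applies inside its loop
def bsbGoodB (l : List Char) : Bool :=
  decide (4 ≤ (PySem.Chars.split₀ l).length) && !pyStrIsupper l

-- A's loop body without the skip guards
def bsbCore (st : List (List Char) × List Char) (line : List Char) :
    List (List Char) × List Char :=
  let buffer := if st.2 ≠ [] then st.2 ++ ' ' :: line else line
  if PySem.Chars.endswith buffer ['.'] then (st.1 ++ [PySem.Chars.strip buffer], [])
  else (st.1, buffer)

-- A's final flush of the buffer
def bsbFinish (st : List (List Char) × List Char) : List (List Char) :=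
  if st.2 ≠ [] then st.1 ++ [PySem.Chars.strip st.2] else st.1

lemma bsbStep_eq (st : List (List Char) × List Char) (l : List Char) :
    bsbStep st l = if bsbGoodB l then bsbCore st l else st := by
  simp only [bsbStep, bsbCore, bsbGoodB]
  by_cases h1 : (PySem.Chars.split₀ l).length < 4
  · simp [h1, Nat.not_le.mpr h1]
  · by_cases h2 : pyStrIsupper l = true
    · simp [h1, h2]
    · simp [h1, h2, Nat.not_lt.mp h1]

lemma bsbValid_eq (text : String) :
    bsbValid text =
      ((PySem.Chars.splitOn text.toList ['\n']).filterMap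
        (fun l => let s := PySem.Chars.strip l; if s = [] then none else some s)).filter
        bsbGoodB := by
  unfold bsbValid
  rw [List.filter_filterMap]
  apply List.filterMap_congr
  intro l _
  by_cases hs : PySem.Chars.strip l = []
  · simp [hs, Option.filter]
  · by_cases hg : bsbGoodB (PySem.Chars.strip l) = true
    · simp only [bsbGoodB, Bool.and_eq_true] at hg
      simp [hs, Option.filter, bsbGoodB, hg.1, hg.2]
    · simp only [bsbGoodB, Bool.and_eq_true, not_and] at hg
      by_cases h4 : (decide (4 ≤ (PySem.Chars.split₀ (PySem.Chars.strip l)).length)) = true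
      · simp [hs, Option.filter, bsbGoodB, h4, hg h4]
      · simp [hs, Option.filter, bsbGoodB, h4]

lemma strip_eq_self_of_stripped (l : List Char) (h : bsbStripped l) :
    PySem.Chars.strip l = l := by
  unfold PySem.Chars.strip PySem.Chars.lstrip PySem.Chars.rstrip
  have h1 : List.dropWhile PySem.Chars.isspace l = l := by
    cases l with
    | nil => simp
    | cons a t =>
      have := h.1 a rfl
      simp [this]
  rw [h1]
  have h2 : List.dropWhile PySem.Chars.isspace l.reverse = l.reverse := by
    cases hr : l.reverse with
    | nil => simp
    | cons a t =>
      have hlast : l.getLast? = some a := by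
        rw [← List.head?_reverse, hr]; rfl
      have := h.2 a hlast
      simp [this]
  rw [h2, List.reverse_reverse]

lemma stripped_strip (l : List Char) : bsbStripped (PySem.Chars.strip l) := by
  unfold PySem.Chars.strip PySem.Chars.lstrip PySem.Chars.rstrip
  set y := List.dropWhile PySem.Chars.isspace l with hy
  constructor
  · intro c hc
    have hpre : (List.dropWhile PySem.Chars.isspace y.reverse).reverse <+: y := by
      have h0 : List.dropWhile PySem.Chars.isspace y.reverse <:+ y.reverse :=
        List.dropWhile_suffix _
      have h1 := List.reverse_prefix.mpr h0
      rwa [List.reverse_reverse] at h1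
    obtain ⟨t, ht⟩ := hpre
    have hyhead : y.head? = some c := by
      rw [← ht]
      cases hv : (List.dropWhile PySem.Chars.isspace y.reverse).reverse with
      | nil => rw [hv] at hc; simp at hc
      | cons a s =>
        rw [hv] at hc
        simp at hc
        simp [hc]
    have := List.head?_dropWhile_not PySem.Chars.isspace l
    rw [← hy, hyhead] at this
    exact this
  · intro c hc
    rw [List.getLast?_reverse] at hc
    have := List.head?_dropWhile_not PySem.Chars.isspace y.reverse
    rw [hc] at this
    exact this

lemma bsb_join_cons (x : List Char) (L : List (List Char)) :
    PySem.Chars.join [' '] (x :: L) =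
      x ++ (if L = [] then [] else ' ' :: PySem.Chars.join [' '] L) := by
  cases L with
  | nil => simp [PySem.Chars.join, List.intercalate]
  | cons y t => simp [PySem.Chars.join, List.intercalate, List.intersperse]

lemma join_nil_iff (L : List (List Char)) (h : ∀ l ∈ L, l ≠ []) :
    (PySem.Chars.join [' '] L = [] ↔ L = []) := by
  constructor
  · intro hj
    cases L with
    | nil => rfl
    | cons x t =>
      rw [bsb_join_cons] at hj
      have hx : x ≠ [] := h x (by simp)
      rcases List.append_eq_nil_iff.mp hj with ⟨h1, _⟩
      exact absurd h1 hx
  · intro hL; subst hL; simp [PySem.Chars.join, List.intercalate]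

lemma join_append_singleton (seg : List (List Char)) (v : List Char) (h : seg ≠ []) :
    PySem.Chars.join [' '] (seg ++ [v]) = PySem.Chars.join [' '] seg ++ ' ' :: v := by
  induction seg with
  | nil => exact absurd rfl h
  | cons x rest ih =>
    cases rest with
    | nil => simp [bsb_join_cons]
    | cons y t =>
      rw [List.cons_append, bsb_join_cons, ih (by simp), bsb_join_cons x (y :: t)]
      simp

lemma head?_join (x : List Char) (L : List (List Char)) (hx : x ≠ []) :
    (PySem.Chars.join [' '] (x :: L)).head? = x.head? := by
  rw [bsb_join_cons]
  cases x with
  | nil => exact absurd rfl hx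
  | cons a t => simp

lemma getLast?_join_last (seg : List (List Char)) (v : List Char) (hv : v ≠ []) :
    (PySem.Chars.join [' '] (seg ++ [v])).getLast? = v.getLast? := by
  cases seg with
  | nil => simp
  | cons x t =>
    rw [join_append_singleton _ _ (by simp), List.getLast?_append]
    have : (' ' :: v).getLast? = v.getLast? := by
      rw [show (' ' :: v) = [' '] ++ v from rfl, List.getLast?_append]
      obtain ⟨c, hc⟩ := List.getLast?_isSome.mpr hv |> Option.isSome_iff_exists.mp
      simp [hc]
    rw [this]
    obtain ⟨c, hc⟩ := List.getLast?_isSome.mpr hv |> Option.isSome_iff_exists.mp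
    simp [hc]

lemma endswith_singleton_iff (l : List Char) (c : Char) :
    PySem.Chars.endswith l [c] = true ↔ l.getLast? = some c := by
  unfold PySem.Chars.endswith
  rw [List.isSuffixOf_iff_suffix]
  constructor
  · rintro ⟨t, ht⟩
    rw [← ht, List.getLast?_append]
    rfl
  · intro hl
    have hne : l ≠ [] := by intro h; rw [h] at hl; simp at hl
    refine ⟨l.dropLast, ?_⟩
    have hc : l.getLast hne = c := by
      rw [List.getLast?_eq_some_getLast hne] at hl
      exact Option.some_inj.mp hl
    rw [← hc]
    exact List.dropLast_append_getLast hne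

lemma stripped_join (L : List (List Char)) (h : ∀ l ∈ L, l ≠ [] ∧ bsbStripped l)
    (hL : L ≠ []) : bsbStripped (PySem.Chars.join [' '] L) := by
  constructor
  · intro c hc
    cases L with
    | nil => exact absurd rfl hL
    | cons x t =>
      have hx := h x (by simp)
      rw [head?_join x t hx.1] at hc
      exact hx.2.1 c hc
  · intro c hc
    have hsplit := List.dropLast_append_getLast hL
    have hvmem : L.getLast hL ∈ L := List.getLast_mem hL
    have hv := h _ hvmem
    rw [← hsplit, getLast?_join_last _ _ hv.1] at hc
    exact hv.2.2 c hc

lemma endswith_join_last (seg : List (List Char)) (v : List Char) (hv : v ≠ []) :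
    PySem.Chars.endswith (PySem.Chars.join [' '] (seg ++ [v])) ['.'] =
      PySem.Chars.endswith v ['.'] := by
  have h1 := getLast?_join_last seg v hv
  by_cases hb : PySem.Chars.endswith v ['.'] = true
  · rw [hb, endswith_singleton_iff, h1, ← endswith_singleton_iff]; exact hb
  · have : ¬ PySem.Chars.endswith (PySem.Chars.join [' '] (seg ++ [v])) ['.'] = true := by
      intro hc
      rw [endswith_singleton_iff, h1, ← endswith_singleton_iff] at hc
      exact hb hc
    rw [Bool.not_eq_true] at this hb
    rw [this, hb]

lemma bsbCore_join (blocks seg : List (List Char)) (v : List Char)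
    (hseg : ∀ l ∈ seg, l ≠ []) :
    bsbCore (blocks, PySem.Chars.join [' '] seg) v =
      (if PySem.Chars.endswith (PySem.Chars.join [' '] (seg ++ [v])) ['.'] = true then
        (blocks ++ [PySem.Chars.strip (PySem.Chars.join [' '] (seg ++ [v]))], [])
      else (blocks, PySem.Chars.join [' '] (seg ++ [v]))) := by
  have hbuf :
      (if PySem.Chars.join [' '] seg ≠ [] then PySem.Chars.join [' '] seg ++ ' ' :: v else v) =
        PySem.Chars.join [' '] (seg ++ [v]) := by
    by_cases hs : seg = []
    · subst hs; simp [PySem.Chars.join, List.intercalate]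
    · rw [if_pos ((join_nil_iff seg hseg).not.mpr hs), join_append_singleton seg v hs]
  simp only [bsbCore]
  rw [hbuf]

lemma bsbBlocksOf_nil : bsbBlocksOf [] = [] := by
  rw [bsbBlocksOf]
  simp

lemma bsb_main (valid : List (List Char)) :
    ∀ (blocks seg : List (List Char)),
      (∀ l ∈ valid, l ≠ [] ∧ bsbStripped l) →
      (∀ l ∈ seg, l ≠ [] ∧ bsbStripped l) →
      (∀ l ∈ seg, PySem.Chars.endswith l ['.'] = false) →
      bsbFinish (valid.foldl bsbCore (blocks, PySem.Chars.join [' '] seg)) =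
        blocks ++ bsbBlocksOf (seg ++ valid) := by
  induction valid with
  | nil =>
    intro blocks seg _ hseg hdot
    simp only [List.foldl_nil, List.append_nil]
    by_cases hs : seg = []
    · subst hs
      simp [bsbFinish, PySem.Chars.join, List.intercalate, bsbBlocksOf_nil]
    · have hne : PySem.Chars.join [' '] seg ≠ [] :=
        (join_nil_iff seg (fun l hl => (hseg l hl).1)).not.mpr hs
      have hstr := strip_eq_self_of_stripped _ (stripped_join seg hseg hs)
      have hfind : seg.findIdx? (fun l => PySem.Chars.endswith l ['.']) = none :=
        List.findIdx?_eq_none_iff.mpr hdot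
      rw [bsbBlocksOf, dif_neg hs, hfind]
      simp [bsbFinish, hne, hstr]
  | cons v vs ih =>
    intro blocks seg hval hseg hdot
    have hv := hval v (by simp)
    have hval' : ∀ l ∈ vs, l ≠ [] ∧ bsbStripped l := fun l hl => hval l (by simp [hl])
    rw [List.foldl_cons, bsbCore_join blocks seg v (fun l hl => (hseg l hl).1),
      endswith_join_last seg v hv.1]
    have hgood' : ∀ l ∈ seg ++ [v], l ≠ [] ∧ bsbStripped l := by
      intro l hl
      rcases List.mem_append.mp hl with h | h
      · exact hseg l h
      · simp at h; subst h; exact hv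
    by_cases hdotv : PySem.Chars.endswith v ['.'] = true
    · rw [if_pos hdotv]
      have hstr := strip_eq_self_of_stripped _ (stripped_join (seg ++ [v]) hgood' (by simp))
      rw [hstr]
      have hjoin0 : PySem.Chars.join [' '] ([] : List (List Char)) = [] := rfl
      have hih := ih (blocks ++ [PySem.Chars.join [' '] (seg ++ [v])]) []
        hval' (by simp) (by simp)
      rw [hjoin0] at hih
      simp only [List.nil_append] at hih
      -- compute bsbBlocksOf (seg ++ v :: vs)
      have hfindseg : seg.findIdx? (fun l => PySem.Chars.endswith l ['.']) = none :=
        List.findIdx?_eq_none_iff.mpr hdot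
      have hfind : (seg ++ v :: vs).findIdx? (fun l => PySem.Chars.endswith l ['.']) =
          some seg.length := by
        rw [List.findIdx?_append, hfindseg, List.findIdx?_cons, if_pos hdotv]
        simp
      have htake : (seg ++ v :: vs).take (seg.length + 1) = seg ++ [v] := by
        rw [List.take_append]
        simp [List.take_of_length_le]
      have hdrop : (seg ++ v :: vs).drop (seg.length + 1) = vs := by
        rw [List.drop_append]
        simp [List.drop_of_length_le]
      have hB : bsbBlocksOf (seg ++ v :: vs) =
          PySem.Chars.join [' '] (seg ++ [v]) :: bsbBlocksOf vs := by
        rw [bsbBlocksOf, dif_neg (by simp), hfind]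
        simp [htake, hdrop]
      rw [hB, hih]
      simp
    · rw [if_neg hdotv]
      have hdot' : ∀ l ∈ seg ++ [v], PySem.Chars.endswith l ['.'] = false := by
        intro l hl
        rcases List.mem_append.mp hl with h | h
        · exact hdot l h
        · simp at h; subst h; exact Bool.eq_false_iff.mpr hdotv
      have := ih blocks (seg ++ [v]) hval' hgood' hdot'
      rw [this, List.append_assoc]
      simp

-- ===== VERDICT (by name: the statement is the Claim_ definition above) =====
theorem build_semantic_blocks_spec : Claim_equal_build_semantic_blocks := by
  intro text _
  unfold Spec_build_semantic_blocks build_semantic_blocks build_semantic_blocks_alt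
  rw [bsbValid_eq]
  set lines := (PySem.Chars.splitOn text.toList ['\n']).filterMap
      (fun l => let s := PySem.Chars.strip l; if s = [] then none else some s) with hlines
  have hstep : bsbStep = fun st l => if bsbGoodB l then bsbCore st l else st :=
    funext fun st => funext fun l => bsbStep_eq st l
  have hfold : lines.foldl bsbStep ([], []) = (lines.filter bsbGoodB).foldl bsbCore ([], []) := by
    rw [hstep, List.foldl_filter]
  have hgood : ∀ l ∈ lines.filter bsbGoodB, l ≠ [] ∧ bsbStripped l := by
    intro l hl
    have hl' : l ∈ lines := List.mem_of_mem_filter hl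
    rw [hlines] at hl'
    obtain ⟨a, _, ha⟩ := List.mem_filterMap.mp hl'
    simp only at ha
    by_cases hsa : PySem.Chars.strip a = []
    · rw [if_pos hsa] at ha; exact absurd ha (by simp)
    · rw [if_neg hsa] at ha
      have : l = PySem.Chars.strip a := (Option.some_inj.mp ha).symm
      subst this
      exact ⟨hsa, stripped_strip a⟩
  have hmain := bsb_main (lines.filter bsbGoodB) [] [] hgood (by simp) (by simp)
  simp only [PySem.Chars.join, List.intercalate, List.intersperse, List.flatten] at hmain
  simp only [hfold, List.nil_append] at hmain ⊢
  exact congrArg (List.map String.ofList) hmain
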